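-- pv_equiv track=rewrite | github.com/youtubediscord/zapret | src/direct_preset/engines/_shared.py | split_header_and_body
-- ===== SOURCE A (Python) =====
-- def normalize_text(text: str) -> str:
--     return str(text or "").replace("\r\n", "\n").replace("\r", "\n")
--
-- def split_header_and_body(text: str) -> tuple[list[str], list[str]]:
--     header_lines: list[str] = []
--     body_lines: list[str] = []
--     in_header = True
--     for raw in normalize_text(text).split("\n"):
--         stripped = raw.strip()
--         if in_header and (stripped.startswith("#") or not stripped):
--             header_lines.append(raw)
--             continue
--         in_header = False
--         body_lines.append(raw)
--     return header_lines, body_lines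
-- ===== SOURCE B (Python) =====
-- def normalize_text(text: str) -> str:
--     return str(text or "").replace("\r\n", "\n").replace("\r", "\n")
--
-- def split_header_and_body(text: str) -> tuple[list[str], list[str]]:
--     def go(lines: list[str]) -> tuple[list[str], list[str]]:
--         if lines:
--             stripped = lines[0].strip()
--             if not stripped or stripped.startswith("#"):
--                 header, body = go(lines[1:])
--                 return [lines[0]] + header, body
--         return [], lines
--     return go(normalize_text(text).split("\n"))
-- ===== Notes on version B (the rewrite author's own statement) =====
-- stated objective: alternative
-- what changed: Replaces the stateful flag-driven loop with dual appends by a structural recursion on the line list: each header line is prepended to the recursive result, and the first body line ends the recursion returning the whole remaining list as the body.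
import Mathlib
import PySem

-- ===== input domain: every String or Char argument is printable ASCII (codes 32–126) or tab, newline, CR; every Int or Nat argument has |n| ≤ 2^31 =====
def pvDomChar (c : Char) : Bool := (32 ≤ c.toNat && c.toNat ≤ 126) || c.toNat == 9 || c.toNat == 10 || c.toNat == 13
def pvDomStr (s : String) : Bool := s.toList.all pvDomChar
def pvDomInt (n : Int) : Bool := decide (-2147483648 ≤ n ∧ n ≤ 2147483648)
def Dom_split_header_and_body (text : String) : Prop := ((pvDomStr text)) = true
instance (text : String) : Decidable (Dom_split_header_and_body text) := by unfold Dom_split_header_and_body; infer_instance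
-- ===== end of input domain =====

-- B replaces A's flag-driven loop with dual appends by a structural recursion on the line list
-- (alternative decomposition, same cost).

-- ===== PORT A =====
-- `str(text or "")` on a str argument is the string itself ("" when text = "")
def normalize_text (text : String) : String :=
  PySem.Str.replace (PySem.Str.replace text "\r\n" "\n") "\r" "\n"

-- the loop body of A: state = (header_lines, body_lines, in_header)
def pvStepA (st : List String × List String × Bool) (raw : String) : List String × List String × Bool :=
  let stripped := PySem.Str.strip raw
  if st.2.2 && (PySem.Str.startswith stripped "#" || stripped == "") then
    (st.1 ++ [raw], st.2.1, st.2.2)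
  else
    (st.1, st.2.1 ++ [raw], false)

def split_header_and_body (text : String) : List String × List String :=
  -- split? is never none for the nonempty separator "\n"
  let r := ((PySem.Str.split? (normalize_text text) "\n").getD []).foldl pvStepA ([], [], true)
  (r.1, r.2.1)

-- ===== PORT B =====
-- the inner recursive `go` of Source B: a header line is prepended to the recursive result,
-- the first body line ends the recursion with the whole remaining list as body
def pvGoB : List String → List String × List String
  | [] => ([], [])
  | x :: xs =>
      let stripped := PySem.Str.strip x
      if stripped == "" || PySem.Str.startswith stripped "#" then
        let r := pvGoB xs
        (x :: r.1, r.2)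
      else ([], x :: xs)

def split_header_and_body_alt (text : String) : List String × List String :=
  pvGoB ((PySem.Str.split? (normalize_text text) "\n").getD [])

-- ===== PRECONDITION & SPEC =====
def Spec_split_header_and_body (text : String) (out : List String × List String) : Prop := out = split_header_and_body_alt text
instance (text : String) (out : List String × List String) : Decidable (Spec_split_header_and_body text out) := by unfold Spec_split_header_and_body; infer_instance

-- ===== CLAIM (what is proved, stated in full; the proofs are below) =====
def Claim_equal_split_header_and_body : Prop := ∀ (text : String), Dom_split_header_and_body text → Spec_split_header_and_body text (split_header_and_body text)

-- ===== LEMMAS AND PROOFS =====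

lemma pvFoldA_false (lines : List String) (h b : List String) :
    lines.foldl pvStepA (h, b, false) = (h, b ++ lines, false) := by
  induction lines generalizing h b with
  | nil => simp
  | cons x xs ih =>
      simp only [List.foldl_cons, pvStepA, Bool.false_and, Bool.false_eq_true, if_false]
      rw [ih]; simp

lemma pvFoldA_go (lines : List String) (h b : List String) :
    lines.foldl pvStepA (h, b, true) =
      (h ++ (pvGoB lines).1, b ++ (pvGoB lines).2, (pvGoB lines).2.isEmpty) := by
  induction lines generalizing h b with
  | nil => simp [pvGoB]
  | cons x xs ih =>
      by_cases hx : (PySem.Str.strip x == "" || PySem.Str.startswith (PySem.Str.strip x) "#") = true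
      · have hc : (PySem.Str.startswith (PySem.Str.strip x) "#" || PySem.Str.strip x == "") = true := by
          rw [Bool.or_comm]; exact hx
        simp only [List.foldl_cons, pvStepA, Bool.true_and, hc, if_true, pvGoB, hx]
        rw [ih]; simp
      · have hc : (PySem.Str.startswith (PySem.Str.strip x) "#" || PySem.Str.strip x == "") = false := by
          rw [Bool.or_comm]; simpa using hx
        simp only [List.foldl_cons, pvStepA, Bool.true_and, hc, Bool.false_eq_true, if_false,
          pvGoB, hx]
        rw [pvFoldA_false]; simp

-- ===== VERDICT (by name: the statement is the Claim_ definition above) =====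
theorem split_header_and_body_spec : Claim_equal_split_header_and_body := by
  intro text _
  unfold Spec_split_header_and_body split_header_and_body split_header_and_body_alt
  rw [pvFoldA_go]
  simp
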